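-- pv_equiv track=rewrite | github.com/jugmac00/launchpad-buildd | lpbuildd/debian.py | _parseChangesFile
-- ===== SOURCE A (Python) =====
-- def _parseChangesFile(linesIter):
--     """A generator that iterates over files listed in a changes file.
--
--     :param linesIter: an iterable of lines in a changes file.
--     """
--     seenfiles = False
--     for line in linesIter:
--         if line.endswith("\n"):
--             line = line[:-1]
--         if not seenfiles and line.startswith("Files:"):
--             seenfiles = True
--         elif seenfiles:
--             if not line.startswith(" "):
--                 break
--             filename = line.split(" ")[-1]
--             yield filename
-- ===== SOURCE B (Python) =====
-- def _parseChangesFile(linesIter):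
--     """Phase-decomposed rewrite: strip newlines once, locate the "Files:"
--     header, then collect the indented continuation lines after it."""
--     lines = [l.removesuffix("\n") for l in linesIter]
--     idx = next((i for i, l in enumerate(lines) if l.startswith("Files:")), None)
--     if idx is None:
--         return []
--     files = []
--     for line in lines[idx + 1:]:
--         if not line.startswith(" "):
--             break
--         files.append(line.split(" ")[-1])
--     return files
-- ===== Notes on version B (the rewrite author's own statement) =====
-- stated objective: idiomatic
-- what changed: Replaced A's flag-gated single loop (seenfiles state machine with break) by a phase decomposition: strip newlines once, find the index of the 'Files:' header, then a take-while collection over the lines after it.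
import Mathlib
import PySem

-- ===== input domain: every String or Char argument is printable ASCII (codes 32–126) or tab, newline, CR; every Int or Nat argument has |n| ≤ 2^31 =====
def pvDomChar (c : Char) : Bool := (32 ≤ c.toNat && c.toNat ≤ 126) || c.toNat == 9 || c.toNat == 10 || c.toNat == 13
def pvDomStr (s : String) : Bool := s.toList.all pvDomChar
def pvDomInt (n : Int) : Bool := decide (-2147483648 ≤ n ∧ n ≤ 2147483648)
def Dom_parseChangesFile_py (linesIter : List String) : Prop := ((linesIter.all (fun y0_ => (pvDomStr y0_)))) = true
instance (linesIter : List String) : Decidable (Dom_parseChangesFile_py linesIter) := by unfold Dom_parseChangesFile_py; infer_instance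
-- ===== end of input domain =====

-- B strips newlines once, finds the "Files:" header index, then collects the indented
-- continuation lines after it; equivalence with A's flag-gated loop is proved on all inputs.

-- shared per-line field extraction: line.split(" ")[-1] (split(" ") is never empty and the
-- separator is nonempty, so both .getD defaults are unreachable)
def pyLastField (line : String) : String :=
  PySem.List.pyGetD ((PySem.Str.split? line " ").getD []) (-1) ""

-- line[:-1] if line ends with "\n"
def pyStripNl (l : String) : String :=
  if PySem.Str.endswith l "\n" then PySem.Str.slice l none (some (-1)) else l

-- ===== PORT A =====
def parseChangesFile_py_go (seen : Bool) : List String → List String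
  | [] => []
  | l :: rest =>
    let line := pyStripNl l
    if !seen && PySem.Str.startswith line "Files:" then
      parseChangesFile_py_go true rest
    else if seen then
      if !(PySem.Str.startswith line " ") then []
      else pyLastField line :: parseChangesFile_py_go seen rest
    else parseChangesFile_py_go seen rest

def parseChangesFile_py (linesIter : List String) : List String :=
  parseChangesFile_py_go false linesIter

-- ===== PORT B =====
-- the collecting loop over the lines after the header (break on a non-indented line)
def altCollect : List String → List String
  | [] => []
  | line :: rest =>
    if PySem.Str.startswith line " " then pyLastField line :: altCollect rest
    else []

def parseChangesFile_py_alt (linesIter : List String) : List String :=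
  let lines := linesIter.map pyStripNl
  match lines.findIdx? (fun l => PySem.Str.startswith l "Files:") with
  | none => []
  | some idx => altCollect (lines.drop (idx + 1))

-- ===== PRECONDITION & SPEC =====
def Spec_parseChangesFile_py (linesIter : List String) (out : List String) : Prop := out = parseChangesFile_py_alt linesIter
instance (linesIter : List String) (out : List String) : Decidable (Spec_parseChangesFile_py linesIter out) := by unfold Spec_parseChangesFile_py; infer_instance

-- ===== CLAIM (what is proved, stated in full; the proofs are below) =====
def Claim_equal_parseChangesFile_py : Prop := ∀ (linesIter : List String), Dom_parseChangesFile_py linesIter → Spec_parseChangesFile_py linesIter (parseChangesFile_py linesIter)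

-- ===== LEMMAS AND PROOFS =====

lemma go_true (lines : List String) :
    parseChangesFile_py_go true lines = altCollect (lines.map pyStripNl) := by
  induction lines with
  | nil => rfl
  | cons l rest ih =>
    by_cases h : PySem.Chars.startswith (pyStripNl l).toList [' '] = true <;>
      simp [parseChangesFile_py_go, altCollect, h, ih]

lemma go_false (lines : List String) :
    parseChangesFile_py_go false lines = parseChangesFile_py_alt lines := by
  induction lines with
  | nil => rfl
  | cons l rest ih =>
    simp only [parseChangesFile_py_go, parseChangesFile_py_alt, List.map_cons,
      List.findIdx?_cons, Bool.not_false, Bool.true_and]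
    by_cases h : PySem.Str.startswith (pyStripNl l) "Files:" = true
    · simp only [h, reduceIte, List.drop_succ_cons, List.drop_zero, go_true]
    · simp only [h, Bool.false_eq_true, reduceIte, ih, parseChangesFile_py_alt]
      cases (rest.map pyStripNl).findIdx? (fun l => PySem.Str.startswith l "Files:") with
      | none => rfl
      | some i => simp [List.drop_succ_cons]

-- ===== VERDICT (by name: the statement is the Claim_ definition above) =====
theorem parseChangesFile_py_spec : Claim_equal_parseChangesFile_py := by
  intro linesIter _
  unfold Spec_parseChangesFile_py parseChangesFile_py
  exact go_false linesIter
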